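-- pv_equiv track=rewrite | github.com/pipeshub-ai/pipeshub-ai | backend/python/app/modules/parsers/excel/excel_parser.py | _select_representative_sample_rows
-- ===== SOURCE A (Python) =====
-- from typing import Any, Dict, List, Optional, Tuple, Union
--
-- NUM_SAMPLE_ROWS = 5  # Number of representative sample rows to select for header generation
--
-- def _select_representative_sample_rows(
--     data_rows: List[List[Any]], num_sample_rows: int = NUM_SAMPLE_ROWS
-- ) -> List[Tuple[int, List[Any], int]]:
--     """
--     Select representative sample rows from data by prioritizing rows with fewer empty values.
--
--     This method selects up to num_sample_rows rows, prioritizing: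
--     1. Perfect rows with no empty values (stops early if enough are found)
--     2. Rows with the fewest empty values as fallback
--
--     Args:
--         data_rows: List of rows (each row is a list of values)
--         num_sample_rows: Number of sample rows to select (default: NUM_SAMPLE_ROWS)
--
--     Returns:
--         List of tuples (row_index, row_list, empty_count) sorted by original index
--     """
--     selected_rows = []
--     fallback_rows = []
--
--     for idx, row in enumerate(data_rows):
--         # Count empty values in this row
--         empty_count = sum(1 for value in row if value is None or (isinstance(value, str) and value.strip() == ""))
--
--         if empty_count == 0:
--             # Perfect row with no empty values
--             selected_rows.append((idx, row, empty_count))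
--             if len(selected_rows) >= num_sample_rows:
--                 break  # Early stop - found enough perfect rows
--         else:
--             # Keep track of best non-perfect rows as fallback
--             fallback_rows.append((idx, row, empty_count))
--
--     # If we didn't find enough perfect rows, supplement with the best fallback rows
--     if len(selected_rows) < num_sample_rows:
--         # Sort fallback rows by empty count (ascending), then by index
--         fallback_rows.sort(key=lambda x: (x[2], x[0]))
--         # Add the best fallback rows to reach the target count
--         needed = num_sample_rows - len(selected_rows)
--         selected_rows.extend(fallback_rows[:needed])
--
--     # Sort by original index to maintain logical order
--     selected_rows.sort(key=lambda x: x[0])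
--
--     return selected_rows
-- ===== SOURCE B (Python) =====
-- NUM_SAMPLE_ROWS = 5
--
--
-- def _select_representative_sample_rows(data_rows, num_sample_rows=NUM_SAMPLE_ROWS):
--     # Select the num_sample_rows rows with the fewest empty values (ties broken by
--     # original position), returned in original-index order.
--     if num_sample_rows <= 0:
--         return []
--     scored = [
--         (idx, row, sum(1 for v in row if v is None or (isinstance(v, str) and v.strip() == "")))
--         for idx, row in enumerate(data_rows)
--     ]
--     best = sorted(scored, key=lambda t: (t[2], t[0]))[:num_sample_rows]
--     best.sort(key=lambda t: t[0])
--     return best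
-- ===== Notes on version B (the rewrite author's own statement) =====
-- stated objective: simpler
-- what changed: B replaces A's two-accumulator scan with early break plus fallback-sort-and-supplement by a single score-everything pass, one stable sort by (empty_count, index) truncated to k, and a final sort by index.
-- intended difference: When num_sample_rows <= 0 and the data contains a row with no empty values, A still returns a one-element list holding the first such perfect row (its early-break fires before the count is checked), while B returns [] — the intended result when zero or fewer sample rows are requested. — e.g. on _select_representative_sample_rows([[some "x"]], 0): A returns [(0, [some "x"], 0)], B returns []
import Mathlib
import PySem

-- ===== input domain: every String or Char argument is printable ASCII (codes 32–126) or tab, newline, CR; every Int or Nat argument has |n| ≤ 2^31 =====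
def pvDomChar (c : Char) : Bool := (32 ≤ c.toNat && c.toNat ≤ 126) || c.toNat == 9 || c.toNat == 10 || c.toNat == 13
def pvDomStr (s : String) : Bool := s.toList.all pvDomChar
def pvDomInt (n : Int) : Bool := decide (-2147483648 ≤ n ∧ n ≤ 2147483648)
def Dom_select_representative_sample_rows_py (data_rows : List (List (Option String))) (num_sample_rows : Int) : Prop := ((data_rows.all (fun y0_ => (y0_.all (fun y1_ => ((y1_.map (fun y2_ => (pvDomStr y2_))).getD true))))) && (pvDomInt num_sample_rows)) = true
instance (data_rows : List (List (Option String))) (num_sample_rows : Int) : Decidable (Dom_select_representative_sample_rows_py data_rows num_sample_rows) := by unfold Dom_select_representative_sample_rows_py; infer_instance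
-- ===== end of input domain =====

-- B selects the k rows with fewest empty values by one stable sort by (empty_count, index)
-- truncated to k, instead of A's two-accumulator scan with early break plus fallback
-- supplement (objective: simpler); B returns [] when num_sample_rows ≤ 0 (see D_ below).

-- ===== PORT A =====
-- 'value is None or (isinstance(value, str) and value.strip() == "")'
def pyEmpty (v : Option String) : Bool :=
  match v with
  | none => true
  | some s => PySem.Str.strip s == ""

-- 'sum(1 for value in row if …)' : a 0/1-sum over the row, i.e. countP
def emptyCount (row : List (Option String)) : Int := (row.countP pyEmpty : Int)

-- the 'for idx, row in enumerate(data_rows)' loop with its early break: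
-- state = (selected_rows, fallback_rows)
def loopA (k : Int) : List (List (Option String)) → Int →
    List (Int × List (Option String) × Int) → List (Int × List (Option String) × Int) →
    List (Int × List (Option String) × Int) × List (Int × List (Option String) × Int)
  | [], _, sel, fb => (sel, fb)
  | r :: rest, idx, sel, fb =>
    let c := emptyCount r
    if c = 0 then
      let sel' := sel ++ [(idx, r, c)]
      if (sel'.length : Int) ≥ k then (sel', fb)
      else loopA k rest (idx + 1) sel' fb
    else loopA k rest (idx + 1) sel (fb ++ [(idx, r, c)])

def select_representative_sample_rows_py (data_rows : List (List (Option String))) (num_sample_rows : Int) : List (Int × List (Option String) × Int) :=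
  let p := loopA num_sample_rows data_rows 0 [] []
  let selected :=
    if (p.1.length : Int) < num_sample_rows then
      -- fallback_rows.sort(key=lambda x: (x[2], x[0])); selected.extend(fallback_rows[:needed])
      let fbs := PySem.List.sorted2 p.2 (fun x => x.2.2) (fun x => x.1)
      let needed := num_sample_rows - (p.1.length : Int)
      p.1 ++ PySem.List.slice fbs none (some needed)
    else p.1
  -- selected_rows.sort(key=lambda x: x[0])
  PySem.List.sorted selected (fun x => x.1)

-- ===== PORT B =====
def select_representative_sample_rows_py_alt (data_rows : List (List (Option String))) (num_sample_rows : Int) : List (Int × List (Option String) × Int) :=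
  if num_sample_rows ≤ 0 then []
  else
    let scored := (PySem.List.enumerate data_rows).map (fun p => (p.1, p.2, emptyCount p.2))
    let best := PySem.List.slice (PySem.List.sorted2 scored (fun t => t.2.2) (fun t => t.1)) none (some num_sample_rows)
    PySem.List.sorted best (fun t => t.1)

-- ===== PRECONDITION & SPEC =====
-- When num_sample_rows ≤ 0 and some row has no empty values, A returns a one-element list
-- holding the first such perfect row (its early break fires before the count is checked),
-- while B returns [] — the intended result when zero or fewer sample rows are requested.
def D_select_representative_sample_rows_py (data_rows : List (List (Option String))) (num_sample_rows : Int) : Prop :=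
  num_sample_rows ≤ 0 ∧ (data_rows.any (fun row => row.all (fun v => !pyEmpty v))) = true
instance (data_rows : List (List (Option String))) (num_sample_rows : Int) : Decidable (D_select_representative_sample_rows_py data_rows num_sample_rows) := by unfold D_select_representative_sample_rows_py; infer_instance

def Spec_select_representative_sample_rows_py (data_rows : List (List (Option String))) (num_sample_rows : Int) (out : List (Int × List (Option String) × Int)) : Prop := ¬ D_select_representative_sample_rows_py data_rows num_sample_rows → out = select_representative_sample_rows_py_alt data_rows num_sample_rows
instance (data_rows : List (List (Option String))) (num_sample_rows : Int) (out : List (Int × List (Option String) × Int)) : Decidable (Spec_select_representative_sample_rows_py data_rows num_sample_rows out) := by unfold Spec_select_representative_sample_rows_py; infer_instance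

def pvDiffWitness_select_representative_sample_rows_py : List (List (Option String)) × Int := ([[some "x"]], 0)
def pvDiffWitnessOut_select_representative_sample_rows_py : (List (Int × List (Option String) × Int)) × (List (Int × List (Option String) × Int)) := ([(0, [some "x"], 0)], [])

-- ===== CLAIM (what is proved, stated in full; the proofs are below) =====
def Claim_unchanged_select_representative_sample_rows_py : Prop := ∀ (data_rows : List (List (Option String))) (num_sample_rows : Int), Dom_select_representative_sample_rows_py data_rows num_sample_rows → Spec_select_representative_sample_rows_py data_rows num_sample_rows (select_representative_sample_rows_py data_rows num_sample_rows)
def Claim_changed_select_representative_sample_rows_py : Prop := Dom_select_representative_sample_rows_py (pvDiffWitness_select_representative_sample_rows_py.1) (pvDiffWitness_select_representative_sample_rows_py.2) ∧ D_select_representative_sample_rows_py (pvDiffWitness_select_representative_sample_rows_py.1) (pvDiffWitness_select_representative_sample_rows_py.2) ∧ select_representative_sample_rows_py (pvDiffWitness_select_representative_sample_rows_py.1) (pvDiffWitness_select_representative_sample_rows_py.2) = pvDiffWitnessOut_select_representative_sample_rows_py.1 ∧ select_representative_sample_rows_py_alt (pvDiffWitness_select_representative_sample_rows_py.1) (pvDiffWitness_select_representative_sample_rows_py.2)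 = pvDiffWitnessOut_select_representative_sample_rows_py.2 ∧ pvDiffWitnessOut_select_representative_sample_rows_py.1 ≠ pvDiffWitnessOut_select_representative_sample_rows_py.2
def Claim_exact_select_representative_sample_rows_py : Prop := ∀ (data_rows : List (List (Option String))) (num_sample_rows : Int), Dom_select_representative_sample_rows_py data_rows num_sample_rows → D_select_representative_sample_rows_py data_rows num_sample_rows → select_representative_sample_rows_py data_rows num_sample_rows ≠ select_representative_sample_rows_py_alt data_rows num_sample_rows

-- ===== LEMMAS AND PROOFS =====

-- the enumerated (idx, row, empty_count) triples starting at index i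
def pvTriples : List (List (Option String)) → Int → List (Int × List (Option String) × Int)
  | [], _ => []
  | r :: rest, i => (i, r, emptyCount r) :: pvTriples rest (i + 1)

def pvGood (t : Int × List (Option String) × Int) : Bool := t.2.2 == 0

def pvKey (t : Int × List (Option String) × Int) : Lex (Int × Int) := toLex (t.2.2, t.1)

theorem pv_sorted2_eq (xs : List (Int × List (Option String) × Int)) :
    PySem.List.sorted2 xs (fun t => t.2.2) (fun t => t.1) = PySem.List.sorted xs pvKey := by
  rw [PySem.List.sorted_eq_foldl_insertBy]
  simp only [PySem.List.sorted2, Bool.false_eq_true, if_false]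
  have hb : (fun (a b : Int × List (Option String) × Int) =>
        decide (a.2.2 < b.2.2) || (!decide (b.2.2 < a.2.2) && decide (a.1 < b.1))) =
      fun a b => decide (pvKey a < pvKey b) := by
    funext a b
    have hlex : (pvKey a < pvKey b) ↔ (a.2.2 < b.2.2 ∨ (a.2.2 = b.2.2 ∧ a.1 < b.1)) := by
      simpa [pvKey] using (Prod.Lex.lt_iff (x := toLex (a.2.2, a.1)) (y := toLex (b.2.2, b.1)))
    rw [Bool.eq_iff_iff]
    simp only [hlex, Bool.or_eq_true, Bool.and_eq_true, Bool.not_eq_true', decide_eq_true_eq,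
      decide_eq_false_iff_not]
    omega
  rw [hb]

theorem pv_scored_eq (rows : List (List (Option String))) (i : Int) :
    (PySem.List.enumerate rows i).map (fun p => (p.1, p.2, emptyCount p.2)) = pvTriples rows i := by
  induction rows generalizing i with
  | nil => simp [PySem.List.enumerate, pvTriples]
  | cons r rest ih => simp [PySem.List.enumerate, pvTriples, ih]

theorem pv_triples_idx_lower (rows : List (List (Option String))) (i : Int) :
    ∀ t ∈ pvTriples rows i, i ≤ t.1 ∧ t.2.2 = emptyCount t.2.1 := by
  induction rows generalizing i with
  | nil => simp [pvTriples]
  | cons r rest ih =>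
    intro t ht
    simp only [pvTriples, List.mem_cons] at ht
    rcases ht with h | h
    · subst h; exact ⟨le_refl _, rfl⟩
    · have := ih (i + 1) t h
      exact ⟨by omega, this.2⟩

theorem pv_triples_pairwise (rows : List (List (Option String))) (i : Int) :
    (pvTriples rows i).Pairwise (fun a b => a.1 < b.1) := by
  induction rows generalizing i with
  | nil => simp [pvTriples]
  | cons r rest ih =>
    simp only [pvTriples, List.pairwise_cons]
    refine ⟨fun t ht => ?_, ih (i + 1)⟩
    have := (pv_triples_idx_lower rest (i + 1) t ht).1
    simpa using by omega

theorem pv_key_lt_of_c_lt {a b : Int × List (Option String) × Int}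
    (h : a.2.2 < b.2.2) : pvKey a < pvKey b := by
  rw [pvKey, pvKey, Prod.Lex.lt_iff]
  exact Or.inl h

theorem pv_key_lt_of_idx_lt {a b : Int × List (Option String) × Int}
    (hc : a.2.2 = b.2.2) (h : a.1 < b.1) : pvKey a < pvKey b := by
  rw [pvKey, pvKey, Prod.Lex.lt_iff]
  exact Or.inr ⟨hc, h⟩

theorem pv_idx_eq_of_key_eq {a b : Int × List (Option String) × Int}
    (h : pvKey a = pvKey b) : a.1 = b.1 := by
  have := congrArg (fun x => (ofLex x).2) h
  simpa [pvKey] using this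

theorem pv_sorted_split (rows : List (List (Option String))) (i : Int) :
    PySem.List.sorted (pvTriples rows i) pvKey =
      (pvTriples rows i).filter pvGood ++
        PySem.List.sorted ((pvTriples rows i).filter (fun t => !pvGood t)) pvKey := by
  apply PySem.List.sorted_eq_of_perm_of_pairwise_lt
  · exact ((List.Perm.append_left _ (PySem.List.sorted_perm _ pvKey false)).trans
      (List.filter_append_perm pvGood (pvTriples rows i)))
  · rw [List.pairwise_append]
    have hidx := pv_triples_pairwise rows i
    refine ⟨?_, ?_, ?_⟩
    · -- perfect block: same count 0, strictly increasing index
      refine (hidx.filter pvGood).imp_of_mem (fun ha hb h => ?_)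
      have ha0 : _ = true := (List.mem_filter.mp ha).2
      have hb0 : _ = true := (List.mem_filter.mp hb).2
      simp only [pvGood, beq_iff_eq] at ha0 hb0
      exact pv_key_lt_of_idx_lt (by omega) h
    · -- sorted fallback block: key-nondecreasing with pairwise-distinct indices
      have hle := PySem.List.sorted_pairwise ((pvTriples rows i).filter (fun t => !pvGood t)) pvKey
      have hne : (PySem.List.sorted ((pvTriples rows i).filter (fun t => !pvGood t)) pvKey).Pairwise
          (fun a b => a.1 ≠ b.1) := by
        refine List.Pairwise.perm ((hidx.filter _).imp (fun h => by omega))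
          (PySem.List.sorted_perm _ pvKey false).symm (fun h he => h he.symm)
      exact (hle.and hne).imp (fun ⟨h1, h2⟩ =>
        lt_of_le_of_ne h1 (fun he => h2 (pv_idx_eq_of_key_eq he)))
    · -- every perfect row sorts strictly before every imperfect one
      intro a ha b hb
      have ha0 : _ = true := (List.mem_filter.mp ha).2
      have hbm := (PySem.List.mem_sorted _ pvKey false b).mp hb
      have hb0 : _ = true := (List.mem_filter.mp hbm).2
      have hbc : b.2.2 = emptyCount b.2.1 :=
        (pv_triples_idx_lower rows i b (List.mem_filter.mp hbm).1).2
      have hbnn : 0 ≤ b.2.2 := by rw [hbc, emptyCount]; exact Int.natCast_nonneg _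
      simp only [pvGood, Bool.not_eq_eq_eq_not, Bool.not_true, beq_eq_false_iff_ne,
        beq_iff_eq] at ha0 hb0
      exact pv_key_lt_of_c_lt (by omega)

theorem pv_perfect_iff (row : List (Option String)) :
    emptyCount row = 0 ↔ row.all (fun v => !pyEmpty v) = true := by
  simp [emptyCount, List.countP_eq_zero, List.all_eq_true]

theorem pv_loopA_no_break (k : Int) (rows : List (List (Option String))) :
    ∀ (i : Int) (sel fb : List (Int × List (Option String) × Int)),
    ((pvTriples rows i).filter pvGood = [] ∨
      ((sel.length : Int) + (((pvTriples rows i).filter pvGood).length : Int) < k)) →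
    loopA k rows i sel fb =
      (sel ++ (pvTriples rows i).filter pvGood, fb ++ (pvTriples rows i).filter (fun t => !pvGood t)) := by
  induction rows with
  | nil => intro i sel fb _; simp [loopA, pvTriples]
  | cons r rest ih =>
    intro i sel fb h
    simp only [pvTriples, List.filter_cons] at h ⊢
    by_cases hc : emptyCount r = 0
    · have hg : pvGood (i, r, emptyCount r) = true := by simp [pvGood, hc]
      simp only [hg, if_pos, Bool.not_true, Bool.false_eq_true, if_false] at h ⊢
      have hlen : (sel.length : Int) + 1 + (((pvTriples rest (i + 1)).filter pvGood).length : Int) < k := by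
        rcases h with h | h
        · exact absurd h (List.cons_ne_nil _ _)
        · simp only [List.length_cons] at h; push_cast at h ⊢; omega
      rw [loopA]
      simp only [if_pos hc]
      rw [if_neg (by simp only [List.length_append, List.length_cons, List.length_nil]; push_cast; omega)]
      rw [ih (i + 1) (sel ++ [(i, r, emptyCount r)]) fb
        (Or.inr (by simp only [List.length_append, List.length_cons, List.length_nil]; push_cast at hlen ⊢; omega))]
      simp [List.append_assoc]
    · have hg : pvGood (i, r, emptyCount r) = false := by simp [pvGood, hc]
      simp only [hg, Bool.false_eq_true, if_false, Bool.not_false, if_pos] at h ⊢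
      rw [loopA]
      simp only [if_neg hc]
      rw [ih (i + 1) sel (fb ++ [(i, r, emptyCount r)]) h]
      simp [List.append_assoc]

theorem pv_loopA_break (k : Int) (rows : List (List (Option String))) :
    ∀ (i : Int) (sel fb : List (Int × List (Option String) × Int)),
    (sel.length : Int) < k →
    k ≤ (sel.length : Int) + (((pvTriples rows i).filter pvGood).length : Int) →
    ∃ fb', loopA k rows i sel fb =
      (sel ++ ((pvTriples rows i).filter pvGood).take (k - (sel.length : Int)).toNat, fb') := by
  induction rows with
  | nil =>
    intro i sel fb h1 h2
    simp only [pvTriples, List.filter_nil, List.length_nil] at h2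
    omega
  | cons r rest ih =>
    intro i sel fb h1 h2
    simp only [pvTriples, List.filter_cons] at h2 ⊢
    by_cases hc : emptyCount r = 0
    · have hg : pvGood (i, r, emptyCount r) = true := by simp [pvGood, hc]
      simp only [hg, if_pos, List.length_cons] at h2 ⊢
      rw [loopA]
      simp only [if_pos hc]
      by_cases hbr : ((sel ++ [(i, r, emptyCount r)]).length : Int) ≥ k
      · rw [if_pos hbr]
        refine ⟨fb, ?_⟩
        simp only [List.length_append, List.length_cons, List.length_nil] at hbr
        have hone : (k - (sel.length : Int)).toNat = 1 := by push_cast at hbr; omega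
        rw [hone, List.take_succ_cons, List.take_zero]
      · rw [if_neg hbr]
        simp only [List.length_append, List.length_cons, List.length_nil, not_le] at hbr
        have hlen1 : (sel ++ [(i, r, emptyCount r)]).length = sel.length + 1 := by simp
        obtain ⟨fb', heq⟩ := ih (i + 1) (sel ++ [(i, r, emptyCount r)]) fb
          (by rw [hlen1]; push_cast at hbr ⊢; omega)
          (by rw [hlen1]; push_cast at h2 ⊢; omega)
        refine ⟨fb', ?_⟩
        rw [heq]
        have hsucc : (k - (sel.length : Int)).toNat =
            (k - ((sel ++ [(i, r, emptyCount r)]).length : Int)).toNat + 1 := by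
          rw [hlen1]; push_cast at hbr ⊢; omega
        rw [hsucc, List.take_succ_cons]
        simp [List.append_assoc]
    · have hg : pvGood (i, r, emptyCount r) = false := by simp [pvGood, hc]
      simp only [hg, Bool.false_eq_true, if_false] at h2 ⊢
      rw [loopA]
      simp only [if_neg hc]
      exact ih (i + 1) sel (fb ++ [(i, r, emptyCount r)]) h1 h2

theorem pv_loopA_ne_nil (k : Int) (hk : k ≤ 0) (rows : List (List (Option String))) :
    ∀ (i : Int) (fb : List (Int × List (Option String) × Int)),
    rows.any (fun row => row.all (fun v => !pyEmpty v)) = true →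
    (loopA k rows i [] fb).1 ≠ [] := by
  induction rows with
  | nil => intro i fb h; simp at h
  | cons r rest ih =>
    intro i fb h
    by_cases hc : emptyCount r = 0
    · rw [loopA]
      simp only [if_pos hc]
      rw [if_pos (by simp only [List.nil_append, List.length_cons, List.length_nil]; omega)]
      simp
    · have hr : r.all (fun v => !pyEmpty v) = false := by
        rcases Bool.eq_false_or_eq_true (r.all (fun v => !pyEmpty v)) with h' | h'
        · exact absurd ((pv_perfect_iff r).mpr h') hc
        · exact h' 
      simp only [List.any_cons, hr, Bool.false_or] at h
      rw [loopA]
      simp only [if_neg hc]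
      exact ih (i + 1) (fb ++ [(i, r, emptyCount r)]) h

theorem pv_noperfect (rows : List (List (Option String)))
    (h : rows.any (fun row => row.all (fun v => !pyEmpty v)) = false) :
    ∀ i : Int, (pvTriples rows i).filter pvGood = [] := by
  induction rows with
  | nil => intro i; simp [pvTriples]
  | cons r rest ih =>
    intro i
    simp only [List.any_cons, Bool.or_eq_false_iff] at h
    have hc : ¬ emptyCount r = 0 := fun hc => by
      rw [(pv_perfect_iff r).mp hc] at h; exact absurd h.1 (by simp)
    simp only [pvTriples, List.filter_cons]
    rw [if_neg (by simp [pvGood, hc])]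
    exact ih h.2 (i + 1)

-- ===== VERDICT (by name: the statement is the Claim_ definition above) =====
theorem select_representative_sample_rows_py_spec : Claim_unchanged_select_representative_sample_rows_py := by
  intro rows k _
  unfold Spec_select_representative_sample_rows_py
  intro hnd
  by_cases hk : k ≤ 0
  · -- no perfect row exists (otherwise we would be inside D_), and nothing is selected
    have hany : rows.any (fun row => row.all (fun v => !pyEmpty v)) = false := by
      rcases Bool.eq_false_or_eq_true (rows.any (fun row => row.all (fun v => !pyEmpty v))) with h' | h'
      · exact absurd ⟨hk, h'⟩ hnd
      · exact h' 
    have hP := pv_noperfect rows hany 0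
    rw [select_representative_sample_rows_py_alt, if_pos hk]
    rw [select_representative_sample_rows_py]
    rw [pv_loopA_no_break k rows 0 [] [] (Or.inl hP)]
    simp only [hP, List.append_nil, List.nil_append, List.length_nil]
    rw [if_neg (by omega)]
    exact (PySem.List.sorted_eq_nil_iff _ _ _).mpr rfl
  · -- k ≥ 1 : both sides are sort-by-index of the same pre-sorted selection
    simp only [select_representative_sample_rows_py_alt]
    rw [if_neg hk, pv_scored_eq rows 0, pv_sorted2_eq, pv_sorted_split,
      PySem.List.slice_to _ (by omega)]
    simp only [select_representative_sample_rows_py]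
    by_cases hcase : k ≤ ((((pvTriples rows 0).filter pvGood).length : Int))
    · -- enough perfect rows: A breaks early, B's truncation never reaches the fallback block
      obtain ⟨fb', heq⟩ := pv_loopA_break k rows 0 [] []
        (by simp only [List.length_nil]; omega) (by simp only [List.length_nil]; push_cast; omega)
      rw [heq]
      simp only [List.nil_append, List.length_nil, Nat.cast_zero, Int.sub_zero]
      have hlen : (((pvTriples rows 0).filter pvGood).take k.toNat).length = k.toNat := by
        rw [List.length_take]; omega
      rw [if_neg (by rw [hlen]; omega)]
      rw [List.take_append_of_le_length (by omega)]
    · -- not enough perfect rows: A supplements from the sorted fallback, B truncates across the join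
      rw [pv_loopA_no_break k rows 0 [] [] (Or.inr (by simp only [List.length_nil]; push_cast; omega))]
      simp only [List.nil_append]
      rw [if_pos (by omega)]
      rw [pv_sorted2_eq, PySem.List.slice_to _ (by omega)]
      have hsplit : k.toNat = ((pvTriples rows 0).filter pvGood).length +
          (k - (((pvTriples rows 0).filter pvGood).length : Int)).toNat := by omega
      rw [hsplit, List.take_length_add_append]

theorem select_representative_sample_rows_py_changed : Claim_changed_select_representative_sample_rows_py := by
  unfold Claim_changed_select_representative_sample_rows_py; decide

theorem select_representative_sample_rows_py_tight : Claim_exact_select_representative_sample_rows_py := by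
  intro rows k _ hd
  obtain ⟨hk, hany⟩ := hd
  rw [select_representative_sample_rows_py_alt, if_pos hk]
  intro heq
  simp only [select_representative_sample_rows_py] at heq
  rw [if_neg (by have := Int.natCast_nonneg (n := (loopA k rows 0 [] []).1.length); omega)] at heq
  exact pv_loopA_ne_nil k hk rows 0 [] hany ((PySem.List.sorted_eq_nil_iff _ _ _).mp heq)
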